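-- pv_equiv track=rewrite | github.com/Emvista/popcorn-dataset | src/pre_processing/1_tokenize_texts.py | rebuild_token
-- ===== SOURCE A (Python) =====
-- def rebuild_token(token: str, b_offset: int, delimiter="'") -> list:
--     """Split and add samples containing unitary tokens.
--     Args:
--         token (str): _description_
--         b_offset (int): _description_
--         delimiter (str, optional): _description_. Defaults to "'".
--     Returns:
--         list: _description_
--     """
--     corrected_split = []
--     subpart = ""
--     for char_index, char in enumerate(token):
--         if char == delimiter:
--             if subpart != "":
--                 corrected_split += [
--                     (
--                         subpart,
--                         (
--                             (
--                                 b_offset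
--                                 if len(corrected_split) == 0
--                                 else corrected_split[-1][1][1]
--                             ),
--                             b_offset + char_index,
--                         ),
--                     ),
--                     (char, (b_offset + char_index, b_offset + char_index + 1)),
--                 ]
--                 subpart = ""
--             else:
--                 corrected_split += [
--                     (char, (b_offset + char_index, b_offset + char_index + 1)),
--                 ]
--         else:
--             subpart += char
--     if len(subpart) > 0:
--         corrected_split.append(
--             (
--                 subpart,
--                 (
--                     (
--                         b_offset
--                         if len(corrected_split) == 0
--                         else corrected_split[-1][1][1]
--                     ),
--                     b_offset + char_index + 1,
--                 ),
--             )
--         )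
--     return corrected_split
-- ===== SOURCE B (Python) =====
-- def rebuild_token(token: str, b_offset: int, delimiter="'") -> list:
--     hits = [(i, c) for i, c in enumerate(token) if c == delimiter]
--     out = []
--     prev = 0
--     for i, c in hits:
--         part = token[prev:i]
--         if part:
--             out.append((part, (b_offset + prev, b_offset + i)))
--         out.append((c, (b_offset + i, b_offset + i + 1)))
--         prev = i + 1
--     tail = token[prev:]
--     if tail:
--         out.append((tail, (b_offset + prev, b_offset + len(token))))
--     return out
-- ===== Notes on version B (the rewrite author's own statement) =====
-- stated objective: simpler
-- what changed: B first collects the delimiter positions and then emits the slices between consecutive positions using pure offset arithmetic (start = b_offset+prev), instead of A's single scan that accumulates a subpart string character by character and reads each span's start off the end of the previously emitted span.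
import Mathlib
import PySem

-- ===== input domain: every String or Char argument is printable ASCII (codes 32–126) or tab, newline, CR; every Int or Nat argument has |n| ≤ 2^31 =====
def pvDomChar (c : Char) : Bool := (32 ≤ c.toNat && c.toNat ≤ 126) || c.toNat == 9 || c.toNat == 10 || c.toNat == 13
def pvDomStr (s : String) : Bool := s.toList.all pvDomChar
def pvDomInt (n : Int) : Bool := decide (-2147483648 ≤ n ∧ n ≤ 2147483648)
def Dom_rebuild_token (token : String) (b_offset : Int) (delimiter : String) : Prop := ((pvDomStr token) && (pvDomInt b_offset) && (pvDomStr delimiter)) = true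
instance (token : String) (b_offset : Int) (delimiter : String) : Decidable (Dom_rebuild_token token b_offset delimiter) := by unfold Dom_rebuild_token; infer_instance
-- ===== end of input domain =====

-- B replaces A's subpart-accumulating scan by a position-table pass with offset arithmetic; same cost, simpler.

-- ===== PORT A =====
-- corrected_split[-1][1][1] with the len == 0 guard of A (the start offset of a new subpart)
def pvPrevEnd (b_offset : Int) (cs : List (String × (Int × Int))) : Int :=
  if cs.length = 0 then b_offset else ((cs.getLast?).getD ("", (0, 0))).2.2

-- the body of A's for-loop; state = (corrected_split, subpart as char list), element = (char, char_index)
def pvStepA (b_offset : Int) (delim : List Char) (st : List (String × (Int × Int)) × List Char)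
    (ic : Char × Nat) : List (String × (Int × Int)) × List Char :=
  match st, ic with
  | (cs, sub), (c, i) =>
    if [c] = delim then
      if sub ≠ [] then
        (cs ++ [(String.mk sub, (pvPrevEnd b_offset cs, b_offset + i)),
                (String.mk [c], (b_offset + i, b_offset + i + 1))], [])
      else
        (cs ++ [(String.mk [c], (b_offset + i, b_offset + i + 1))], sub)
    else
      (cs, sub ++ [c])

def rebuild_token (token : String) (b_offset : Int) (delimiter : String) : List (String × (Int × Int)) :=
  let chars := token.toList
  let r := chars.zipIdx.foldl (pvStepA b_offset delimiter.toList) ([], [])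
  -- if len(subpart) > 0: append with end b_offset + char_index + 1, char_index = len(token) - 1 here
  if r.2.length > 0 then
    r.1 ++ [(String.mk r.2, (pvPrevEnd b_offset r.1, b_offset + ((chars.length : Int) - 1) + 1))]
  else r.1

-- ===== PORT B =====
-- the body of B's for-loop; state = (out, prev), element = (delimiter char, its position)
def pvStepB (chars : List Char) (b_offset : Int) (st : List (String × (Int × Int)) × Nat)
    (p : Char × Nat) : List (String × (Int × Int)) × Nat :=
  match st, p with
  | (out, prev), (c, pos) =>
    let part := (chars.drop prev).take (pos - prev)   -- token[prev:pos]
    let out' := if part ≠ [] then out ++ [(String.mk part, (b_offset + prev, b_offset + pos))] else out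
    (out' ++ [(String.mk [c], (b_offset + pos, b_offset + pos + 1))], pos + 1)

def rebuild_token_alt (token : String) (b_offset : Int) (delimiter : String) : List (String × (Int × Int)) :=
  let chars := token.toList
  let hits := chars.zipIdx.filter (fun p => decide ([p.1] = delimiter.toList))
  let r := hits.foldl (pvStepB chars b_offset) ([], 0)
  let tail := chars.drop r.2                           -- token[prev:]
  if tail ≠ [] then
    r.1 ++ [(String.mk tail, (b_offset + r.2, b_offset + (chars.length : Int)))]
  else r.1

-- ===== PRECONDITION & SPEC =====
def Spec_rebuild_token (token : String) (b_offset : Int) (delimiter : String) (out : List (String × (Int × Int))) : Prop := out = rebuild_token_alt token b_offset delimiter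
instance (token : String) (b_offset : Int) (delimiter : String) (out : List (String × (Int × Int))) : Decidable (Spec_rebuild_token token b_offset delimiter out) := by unfold Spec_rebuild_token; infer_instance

-- ===== CLAIM (what is proved, stated in full; the proofs are below) =====
def Claim_equal_rebuild_token : Prop := ∀ (token : String) (b_offset : Int) (delimiter : String), Dom_rebuild_token token b_offset delimiter → Spec_rebuild_token token b_offset delimiter (rebuild_token token b_offset delimiter)

-- ===== LEMMAS AND PROOFS =====

-- B's step lifted to the unfiltered enumeration: non-delimiter positions leave the state unchanged
def pvLiftB (chars : List Char) (b_offset : Int) (delim : List Char)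
    (st : List (String × (Int × Int)) × Nat) (p : Char × Nat) : List (String × (Int × Int)) × Nat :=
  if [p.1] = delim then pvStepB chars b_offset st p else st

theorem pvFoldFilter (chars : List Char) (b_offset : Int) (delim : List Char)
    (l : List (Char × Nat)) (st : List (String × (Int × Int)) × Nat) :
    (l.filter (fun p => decide ([p.1] = delim))).foldl (pvStepB chars b_offset) st
      = l.foldl (pvLiftB chars b_offset delim) st := by
  induction l generalizing st with
  | nil => rfl
  | cons p l ih =>
    simp only [List.filter_cons]
    by_cases h : [p.1] = delim
    · simp [h, List.foldl_cons, pvLiftB, ih]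
    · simp [h, List.foldl_cons, pvLiftB, ih]

theorem pvPrevEnd_append (b_offset : Int) (cs : List (String × (Int × Int)))
    (x : String × (Int × Int)) : pvPrevEnd b_offset (cs ++ [x]) = x.2.2 := by
  simp [pvPrevEnd]

-- Main invariant: running A's loop and B's (lifted) loop over the same suffix of the
-- enumeration, from related states, yields related states.
theorem pvMain (b_offset : Int) (delim : List Char) (chars : List Char) :
    ∀ (rest : List Char) (k prev : Nat) (cs : List (String × (Int × Int))),
      prev ≤ k → rest = chars.drop k →
      pvPrevEnd b_offset cs = b_offset + prev →
      ((rest.zipIdx k).foldl (pvStepA b_offset delim) (cs, (chars.drop prev).take (k - prev))).1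
          = ((rest.zipIdx k).foldl (pvLiftB chars b_offset delim) (cs, prev)).1
        ∧ ((rest.zipIdx k).foldl (pvStepA b_offset delim) (cs, (chars.drop prev).take (k - prev))).2
          = (chars.drop ((rest.zipIdx k).foldl (pvLiftB chars b_offset delim) (cs, prev)).2).take
              ((k + rest.length) - ((rest.zipIdx k).foldl (pvLiftB chars b_offset delim) (cs, prev)).2)
        ∧ pvPrevEnd b_offset ((rest.zipIdx k).foldl (pvStepA b_offset delim) (cs, (chars.drop prev).take (k - prev))).1
          = b_offset + ((rest.zipIdx k).foldl (pvLiftB chars b_offset delim) (cs, prev)).2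
        ∧ ((rest.zipIdx k).foldl (pvLiftB chars b_offset delim) (cs, prev)).2 ≤ k + rest.length := by
  intro rest
  induction rest with
  | nil =>
    intro k prev cs hpk hdrop hpe
    exact ⟨rfl, by simp, hpe, by simpa using hpk⟩
  | cons c rest ih =>
    intro k prev cs hpk hdrop hpe
    have hdrop' : rest = chars.drop (k + 1) := by
      have : chars.drop (k + 1) = (chars.drop k).drop 1 := by
        rw [List.drop_drop]
      rw [this, ← hdrop]
      simp
    have hck : chars[k]? = some c := by
      have : (chars.drop k)[0]? = some c := by rw [← hdrop]; rfl
      simpa using this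
    rw [List.zipIdx_cons, List.foldl_cons, List.foldl_cons]
    by_cases hd : [c] = delim
    · -- delimiter at position k
      have hsub : (chars.drop prev).take (k - prev) = (chars.drop prev).take (k - prev) := rfl
      by_cases hs : (chars.drop prev).take (k - prev) = []
      · -- A's else branch (subpart empty); B emits no part
        have hA : pvStepA b_offset delim (cs, (chars.drop prev).take (k - prev)) (c, k)
            = (cs ++ [(String.mk [c], (b_offset + k, b_offset + k + 1))], (chars.drop prev).take (k - prev)) := by
          simp [pvStepA, hd, hs]
        have hB : pvLiftB chars b_offset delim (cs, prev) (c, k)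
            = (cs ++ [(String.mk [c], (b_offset + k, b_offset + k + 1))], k + 1) := by
          simp [pvLiftB, hd, pvStepB, hs]
        rw [hA, hB, hs]
        have : ([] : List Char) = (chars.drop (k + 1)).take ((k + 1) - (k + 1)) := by simp
        rw [this]
        have := ih (k + 1) (k + 1) (cs ++ [(String.mk [c], (b_offset + k, b_offset + k + 1))])
          (le_refl _) hdrop' (by rw [pvPrevEnd_append]; push_cast; ring)
        simpa [Nat.add_comm, Nat.add_assoc, Nat.add_left_comm] using this
      · -- A's then branch: emit subpart then delimiter; B emits part = same slice
        have hA : pvStepA b_offset delim (cs, (chars.drop prev).take (k - prev)) (c, k)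
            = (cs ++ [(String.mk ((chars.drop prev).take (k - prev)), (pvPrevEnd b_offset cs, b_offset + k)),
                      (String.mk [c], (b_offset + k, b_offset + k + 1))], []) := by
          simp [pvStepA, hd, hs]
        have hB : pvLiftB chars b_offset delim (cs, prev) (c, k)
            = ((cs ++ [(String.mk ((chars.drop prev).take (k - prev)), (b_offset + prev, b_offset + k))])
                 ++ [(String.mk [c], (b_offset + k, b_offset + k + 1))], k + 1) := by
          simp [pvLiftB, hd, pvStepB, hs]
        rw [hA, hB, hpe]
        have heq : cs ++ [(String.mk ((chars.drop prev).take (k - prev)), (b_offset + prev, b_offset + k)),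
                      (String.mk [c], (b_offset + k, b_offset + k + 1))]
            = (cs ++ [(String.mk ((chars.drop prev).take (k - prev)), (b_offset + prev, b_offset + k))])
                 ++ [(String.mk [c], (b_offset + k, b_offset + k + 1))] := by simp
        rw [heq]
        have hnil : ([] : List Char) = (chars.drop (k + 1)).take ((k + 1) - (k + 1)) := by simp
        rw [hnil]
        have := ih (k + 1) (k + 1)
          ((cs ++ [(String.mk ((chars.drop prev).take (k - prev)), (b_offset + prev, b_offset + k))])
             ++ [(String.mk [c], (b_offset + k, b_offset + k + 1))])
          (le_refl _) hdrop' (by rw [pvPrevEnd_append]; push_cast; ring)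
        simpa [Nat.add_comm, Nat.add_assoc, Nat.add_left_comm] using this
      
    · -- not a delimiter: A extends subpart, B's lifted step is the identity
      have hA : pvStepA b_offset delim (cs, (chars.drop prev).take (k - prev)) (c, k)
          = (cs, (chars.drop prev).take (k - prev) ++ [c]) := by
        simp [pvStepA, hd]
      have hB : pvLiftB chars b_offset delim (cs, prev) (c, k) = (cs, prev) := by
        simp [pvLiftB, hd]
      rw [hA, hB]
      have hext : (chars.drop prev).take (k - prev) ++ [c] = (chars.drop prev).take ((k + 1) - prev) := by
        have h1 : (k + 1) - prev = (k - prev) + 1 := by omega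
        rw [h1, List.take_succ]
        have : (chars.drop prev)[k - prev]? = some c := by
          rw [List.getElem?_drop]
          have : prev + (k - prev) = k := by omega
          rw [this, hck]
        simp [this]
      rw [hext]
      have := ih (k + 1) prev cs (by omega) hdrop' hpe
      simpa [Nat.add_comm, Nat.add_assoc, Nat.add_left_comm] using this

-- ===== VERDICT (by name: the statement is the Claim_ definition above) =====
theorem rebuild_token_spec : Claim_equal_rebuild_token := by
  intro token b_offset delimiter _
  unfold Spec_rebuild_token rebuild_token rebuild_token_alt
  simp only []
  rw [pvFoldFilter]
  set chars := token.toList with hchars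
  have hmain := pvMain b_offset delimiter.toList chars chars 0 0 [] (le_refl 0) (by simp)
    (by simp [pvPrevEnd])
  simp only [Nat.sub_zero, List.take_zero, List.drop_zero, Nat.zero_add] at hmain
  obtain ⟨h1, h2, h3, h4⟩ := hmain
  set rA := (chars.zipIdx.foldl (pvStepA b_offset delimiter.toList) ([], [])) with hrA
  set rB := (chars.zipIdx.foldl (pvLiftB chars b_offset delimiter.toList) ([], 0)) with hrB
  have hsub : rA.2 = chars.drop rB.2 := by
    rw [h2]
    exact List.take_of_length_le (by simp)
  rw [h3, hsub, h1]
  by_cases ht : chars.drop rB.2 = []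
  · simp [ht]
  · rw [if_pos (List.length_pos_iff.mpr ht), if_pos ht,
      show b_offset + ((chars.length : Int) - 1) + 1 = b_offset + (chars.length : Int) from by ring]
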